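-- pv_equiv track=rewrite | github.com/Zack-Fournier/Fournier_Alonso_Marder_2024 | python/pyloricMeasures.py | find_nearby_points
-- ===== SOURCE A (Python) =====
-- def find_nearby_points(local_maxima_indices, derivative_maxima, derivative_minima, proximity_threshold):
--     result_indices = []
--
--     for maxima_idx in local_maxima_indices:
--         # Find nearby maxima and minima indices within the proximity threshold
--         nearby_maxima = [idx for idx in derivative_maxima if abs(idx - maxima_idx) <= proximity_threshold]
--         nearby_minima = [idx for idx in derivative_minima if abs(idx - maxima_idx) <= proximity_threshold]
--
--         # Check if there are both nearby maxima and minima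
--         if nearby_maxima and nearby_minima:
--             # Include the local maxima index in the result
--             result_indices.append(maxima_idx)
--
--     return result_indices
-- ===== SOURCE B (Python) =====
-- def _bisect_left(a, x):
--     # CPython's bisect.bisect_left loop, written out (A's module imports nothing).
--     lo, hi = 0, len(a)
--     while lo < hi:
--         mid = (lo + hi) // 2
--         if a[mid] < x:
--             lo = mid + 1
--         else:
--             hi = mid
--     return lo
--
--
-- def _has_within(a, x, t):
--     # a is sorted ascending: some element lies in [x-t, x+t] iff the first
--     # element >= x-t exists and is <= x+t.
--     i = _bisect_left(a, x - t)
--     return i < len(a) and a[i] <= x + t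
--
--
-- def find_nearby_points(local_maxima_indices, derivative_maxima, derivative_minima, proximity_threshold):
--     dmax = sorted(derivative_maxima)
--     dmin = sorted(derivative_minima)
--     return [x for x in local_maxima_indices
--             if _has_within(dmax, x, proximity_threshold)
--             and _has_within(dmin, x, proximity_threshold)]
-- ===== Notes on version B (the rewrite author's own statement) =====
-- stated objective: faster
-- what changed: B sorts each derivative list once and replaces A's per-maximum full scans with a binary search for the first element >= x - threshold, turning O(k*m) scanning into O((k+m) log m).
import Mathlib
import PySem

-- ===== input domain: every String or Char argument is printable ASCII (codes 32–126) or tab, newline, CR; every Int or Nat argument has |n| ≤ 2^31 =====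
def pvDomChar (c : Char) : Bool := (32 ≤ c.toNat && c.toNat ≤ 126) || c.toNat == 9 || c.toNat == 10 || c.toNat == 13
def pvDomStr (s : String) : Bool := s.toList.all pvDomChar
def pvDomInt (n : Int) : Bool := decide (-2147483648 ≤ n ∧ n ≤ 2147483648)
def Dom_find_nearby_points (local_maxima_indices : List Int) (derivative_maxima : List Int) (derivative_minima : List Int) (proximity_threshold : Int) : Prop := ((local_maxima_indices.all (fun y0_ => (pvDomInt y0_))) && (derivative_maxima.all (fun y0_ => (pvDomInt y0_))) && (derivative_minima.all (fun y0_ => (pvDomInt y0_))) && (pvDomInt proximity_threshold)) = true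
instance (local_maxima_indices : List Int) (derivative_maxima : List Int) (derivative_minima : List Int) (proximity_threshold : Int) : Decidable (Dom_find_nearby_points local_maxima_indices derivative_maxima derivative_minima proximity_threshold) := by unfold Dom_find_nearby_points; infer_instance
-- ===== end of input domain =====

-- B sorts each derivative list once and binary-searches the first element ≥ x - threshold
-- instead of A's per-maximum full scans (objective: faster).


-- ===== PORT A =====
-- for each maxima_idx: filter both derivative lists by |idx - maxima_idx| ≤ t, keep maxima_idx iff both nonempty
def find_nearby_points (local_maxima_indices : List Int) (derivative_maxima : List Int) (derivative_minima : List Int) (proximity_threshold : Int) : List Int :=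
  local_maxima_indices.foldl (fun result_indices maxima_idx =>
    let nearby_maxima := derivative_maxima.filter (fun idx => decide (|idx - maxima_idx| ≤ proximity_threshold))
    let nearby_minima := derivative_minima.filter (fun idx => decide (|idx - maxima_idx| ≤ proximity_threshold))
    if (!nearby_maxima.isEmpty && !nearby_minima.isEmpty) = true then result_indices ++ [maxima_idx] else result_indices) []

-- ===== PORT B =====
-- Source B's _bisect_left is CPython's bisect_left loop verbatim; its Lean counterpart is PySem.List.bisectLeft (the same lo/hi loop).
def pvHasWithin (a : List Int) (x t : Int) : Bool :=
  let i := PySem.List.bisectLeft a (x - t)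
  if h : i < a.length then decide (a[i] ≤ x + t) else false

def find_nearby_points_alt (local_maxima_indices : List Int) (derivative_maxima : List Int) (derivative_minima : List Int) (proximity_threshold : Int) : List Int :=
  let dmax := PySem.List.sorted derivative_maxima (fun y => y) false
  let dmin := PySem.List.sorted derivative_minima (fun y => y) false
  local_maxima_indices.filter (fun x => pvHasWithin dmax x proximity_threshold && pvHasWithin dmin x proximity_threshold)

-- ===== PRECONDITION & SPEC =====
def Spec_find_nearby_points (local_maxima_indices : List Int) (derivative_maxima : List Int) (derivative_minima : List Int) (proximity_threshold : Int) (out : List Int) : Prop := out = find_nearby_points_alt local_maxima_indices derivative_maxima derivative_minima proximity_threshold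
instance (local_maxima_indices : List Int) (derivative_maxima : List Int) (derivative_minima : List Int) (proximity_threshold : Int) (out : List Int) : Decidable (Spec_find_nearby_points local_maxima_indices derivative_maxima derivative_minima proximity_threshold out) := by unfold Spec_find_nearby_points; infer_instance

-- ===== CLAIM (what is proved, stated in full; the proofs are below) =====
def Claim_equal_find_nearby_points : Prop := ∀ (local_maxima_indices : List Int) (derivative_maxima : List Int) (derivative_minima : List Int) (proximity_threshold : Int), Dom_find_nearby_points local_maxima_indices derivative_maxima derivative_minima proximity_threshold → Spec_find_nearby_points local_maxima_indices derivative_maxima derivative_minima proximity_threshold (find_nearby_points local_maxima_indices derivative_maxima derivative_minima proximity_threshold)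

-- ===== LEMMAS AND PROOFS =====

-- On a sorted list, the binary-search membership test answers "is some element within t of x".
theorem pvHasWithin_iff (a : List Int) (x t : Int) (hs : a.Pairwise (· ≤ ·)) :
    pvHasWithin a x t = true ↔ ∃ y ∈ a, x - t ≤ y ∧ y ≤ x + t := by
  obtain ⟨hle, hlt, hge⟩ := PySem.List.bisectLeft_spec a (x - t) hs
  have hbody : pvHasWithin a x t =
      if h : PySem.List.bisectLeft a (x - t) < a.length then
        decide (a[PySem.List.bisectLeft a (x - t)] ≤ x + t) else false := rfl
  constructor
  · intro h
    rw [hbody] at h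
    split at h
    · next hi =>
      exact ⟨a[PySem.List.bisectLeft a (x - t)], List.getElem_mem hi, hge _ hi le_rfl, by simpa using h⟩
    · exact absurd h (by simp)
  · rintro ⟨y, hy, h1, h2⟩
    obtain ⟨j, hj, rfl⟩ := List.getElem_of_mem hy
    have hij : PySem.List.bisectLeft a (x - t) ≤ j := by
      by_contra hcon
      exact absurd h1 (not_le.mpr (hlt j hj (by omega)))
    have hi : PySem.List.bisectLeft a (x - t) < a.length := lt_of_le_of_lt hij hj
    rw [hbody, dif_pos hi]
    have hmono := List.pairwise_iff_getElem.mp hs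
    rcases eq_or_lt_of_le hij with heq | hlt'
    · exact decide_eq_true (by simpa [← heq] using h2)
    · exact decide_eq_true (le_trans (hmono _ _ hi hj hlt') h2)

-- A's per-element test ("filtered nearby list nonempty") matches B's binary-search test.
theorem pvCond_eq (d : List Int) (x t : Int) :
    (!(d.filter (fun idx => decide (|idx - x| ≤ t))).isEmpty) =
      pvHasWithin (PySem.List.sorted d (fun y => y) false) x t := by
  have hs : (PySem.List.sorted d (fun y => y) false).Pairwise (· ≤ ·) := by
    simpa using PySem.List.sorted_pairwise d (fun y => y)
  rcases Bool.eq_false_or_eq_true (pvHasWithin (PySem.List.sorted d (fun y => y) false) x t) with hb | hb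
  swap
  · rw [hb]
    have hno : ¬ ∃ y ∈ PySem.List.sorted d (fun y => y) false, x - t ≤ y ∧ y ≤ x + t := by
      intro h
      have := (pvHasWithin_iff _ x t hs).mpr h
      rw [hb] at this; exact Bool.false_ne_true this
    simp only [PySem.List.mem_sorted] at hno
    simp only [Bool.not_eq_false', List.isEmpty_iff, List.filter_eq_nil_iff]
    intro y hy
    simp only [decide_eq_true_eq]
    intro habs
    have := abs_le.mp habs
    exact hno ⟨y, hy, by omega, by omega⟩
  · rw [hb]
    obtain ⟨y, hy, h1, h2⟩ := (pvHasWithin_iff _ x t hs).mp hb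
    rw [PySem.List.mem_sorted] at hy
    have : y ∈ d.filter (fun idx => decide (|idx - x| ≤ t)) :=
      List.mem_filter.mpr ⟨hy, decide_eq_true (abs_le.mpr ⟨by omega, by omega⟩)⟩
    simp [List.ne_nil_of_mem this]

-- ===== VERDICT (by name: the statement is the Claim_ definition above) =====
theorem find_nearby_points_spec : Claim_equal_find_nearby_points := by
  intro l dmax dmin t _
  show _ = _
  unfold find_nearby_points find_nearby_points_alt
  rw [show (fun (result_indices : List Int) (maxima_idx : Int) =>
        let nearby_maxima := dmax.filter (fun idx => decide (|idx - maxima_idx| ≤ t))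
        let nearby_minima := dmin.filter (fun idx => decide (|idx - maxima_idx| ≤ t))
        if (!nearby_maxima.isEmpty && !nearby_minima.isEmpty) = true then result_indices ++ [maxima_idx] else result_indices)
      = (fun acc x => if (fun x => pvHasWithin (PySem.List.sorted dmax (fun y => y) false) x t
            && pvHasWithin (PySem.List.sorted dmin (fun y => y) false) x t) x = true then acc ++ [(fun (y : Int) => y) x] else acc) from by
        funext acc x
        simp only [pvCond_eq dmax x t, pvCond_eq dmin x t]]
  rw [PySem.List.foldl_append_if]
  simp
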